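-- pv_equiv track=rewrite | github.com/Quiloch/PythonProjekty | cwiczenia/selekcja.py | filtruj_wiek
-- ===== SOURCE A (Python) =====
-- def filtruj_wiek(kolejka_klubowa):
--     wpuszczeni, odrzuceni = [], []
--     kolejka_klubowa.sort()
--     for wiek in kolejka_klubowa:
--         if wiek >= 18:
--             wpuszczeni.append(wiek)
--         else:
--             odrzuceni.append(wiek)
--     return wpuszczeni, odrzuceni
-- ===== SOURCE B (Python) =====
-- def filtruj_wiek(kolejka_klubowa):
--     kolejka_klubowa.sort()
--     lo, hi = 0, len(kolejka_klubowa)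
--     while lo < hi:
--         mid = (lo + hi) // 2
--         if kolejka_klubowa[mid] < 18:
--             lo = mid + 1
--         else:
--             hi = mid
--     return kolejka_klubowa[lo:], kolejka_klubowa[:lo]
-- ===== Notes on version B (the rewrite author's own statement) =====
-- stated objective: alternative
-- what changed: Replaces the per-element append loop with a hand-written binary search (bisect_left) over the sorted list to find the 18-boundary, returning the two halves by slicing.
import Mathlib
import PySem

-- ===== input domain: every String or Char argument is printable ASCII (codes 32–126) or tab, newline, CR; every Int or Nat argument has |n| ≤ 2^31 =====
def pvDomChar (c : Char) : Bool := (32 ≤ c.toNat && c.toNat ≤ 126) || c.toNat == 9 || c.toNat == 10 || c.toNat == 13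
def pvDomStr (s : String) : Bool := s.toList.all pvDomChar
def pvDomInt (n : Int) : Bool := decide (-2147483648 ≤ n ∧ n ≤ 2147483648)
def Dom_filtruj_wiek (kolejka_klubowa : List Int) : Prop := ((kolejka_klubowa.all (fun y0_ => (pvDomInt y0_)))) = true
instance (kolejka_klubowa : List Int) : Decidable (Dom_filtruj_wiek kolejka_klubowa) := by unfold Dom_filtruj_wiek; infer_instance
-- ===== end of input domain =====

-- B replaces A's per-element append loop with a hand-written bisect_left binary search on the
-- sorted list and returns the two halves by slicing (alternative decomposition, same cost class).
-- Both A and B sort the argument in place; the equivalence proved here is about the return value.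


-- ===== PORT A =====
def filtruj_wiek (kolejka_klubowa : List Int) : List Int × List Int :=
  -- wpuszczeni, odrzuceni = [], []; kolejka_klubowa.sort(); for wiek in …: append to one of them
  let sorted := PySem.List.sorted kolejka_klubowa (fun x => x)
  sorted.foldl
    (fun (acc : List Int × List Int) wiek =>
      if wiek ≥ 18 then (acc.1 ++ [wiek], acc.2) else (acc.1, acc.2 ++ [wiek]))
    ([], [])

-- ===== PORT B =====
-- the while-loop of Source B: lo, hi move by binary search until lo = hi
-- (the index mid is always in range on every call made by filtruj_wiek_alt, so getD is exact there)
def pvBisect18 (s : List Int) (lo hi : Nat) : Nat :=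
  if _h : lo < hi then
    let mid := (lo + hi) / 2
    if s.getD mid 0 < 18 then pvBisect18 s (mid + 1) hi else pvBisect18 s lo mid
  else lo
termination_by hi - lo
decreasing_by all_goals omega

def filtruj_wiek_alt (kolejka_klubowa : List Int) : List Int × List Int :=
  let s := PySem.List.sorted kolejka_klubowa (fun x => x)
  let lo := pvBisect18 s 0 s.length
  (PySem.List.slice s (some (lo : Int)) none, PySem.List.slice s none (some (lo : Int)))

-- ===== PRECONDITION & SPEC =====
def Spec_filtruj_wiek (kolejka_klubowa : List Int) (out : List Int × List Int) : Prop := out = filtruj_wiek_alt kolejka_klubowa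
instance (kolejka_klubowa : List Int) (out : List Int × List Int) : Decidable (Spec_filtruj_wiek kolejka_klubowa out) := by unfold Spec_filtruj_wiek; infer_instance

-- ===== CLAIM (what is proved, stated in full; the proofs are below) =====
def Claim_equal_filtruj_wiek : Prop := ∀ (kolejka_klubowa : List Int), Dom_filtruj_wiek kolejka_klubowa → Spec_filtruj_wiek kolejka_klubowa (filtruj_wiek kolejka_klubowa)

-- ===== LEMMAS AND PROOFS =====

-- A's loop appends each element to the first or second accumulator: it computes the two filters.
theorem pv_foldl_split (l : List Int) (a b : List Int) :
    l.foldl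
      (fun (acc : List Int × List Int) wiek =>
        if wiek ≥ 18 then (acc.1 ++ [wiek], acc.2) else (acc.1, acc.2 ++ [wiek]))
      (a, b)
    = (a ++ l.filter (fun w => decide (18 ≤ w)), b ++ l.filter (fun w => decide (w < 18))) := by
  induction l generalizing a b with
  | nil => simp
  | cons x t ih =>
    by_cases hx : (18 : Int) ≤ x
    · simp [List.foldl_cons, hx, ih, show ¬ x < 18 by omega]
    · simp [List.foldl_cons, hx, ih, show x < 18 by omega]

-- invariant of the binary search: below the result every element is < 18, from it on none is,
-- provided the tested predicate is downward closed along indices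
theorem pvBisect18_inv (s : List Int)
    (mono : ∀ j k : Nat, j ≤ k → k < s.length → s.getD k 0 < 18 → s.getD j 0 < 18) :
    ∀ lo hi : Nat, lo ≤ hi → hi ≤ s.length →
      (∀ j : Nat, j < lo → s.getD j 0 < 18) →
      (∀ j : Nat, hi ≤ j → j < s.length → ¬ s.getD j 0 < 18) →
      (pvBisect18 s lo hi ≤ s.length ∧
        (∀ j : Nat, j < pvBisect18 s lo hi → s.getD j 0 < 18) ∧
        (∀ j : Nat, pvBisect18 s lo hi ≤ j → j < s.length → ¬ s.getD j 0 < 18)) := by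
  intro lo hi
  induction hn : hi - lo using Nat.strong_induction_on generalizing lo hi with
  | _ n ih =>
    intro hlohi hhi hbelow habove
    rw [pvBisect18]
    by_cases h : lo < hi
    · simp only [h, dif_pos]
      set mid := (lo + hi) / 2 with hmid
      have hm1 : lo ≤ mid := by omega
      have hm2 : mid < hi := by omega
      by_cases hc : s.getD mid 0 < 18
      · simp only [hc, if_pos]
        exact ih (hi - (mid + 1)) (by omega) (mid + 1) hi rfl (by omega) hhi
          (fun j hj => mono j mid (by omega) (by omega) hc) habove
      · simp only [hc, if_neg, not_false_iff]
        exact ih (mid - lo) (by omega) lo mid rfl hm1 (by omega) hbelow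
          (fun j hj hjl => fun hlt => hc (mono mid j hj hjl hlt))
    · simp only [h, dif_neg, not_false_iff]
      have : lo = hi := by omega
      exact ⟨by omega, hbelow, fun j hj => habove j (by omega)⟩

-- splitting a list at an index r whose left part is exactly the < 18 elements and right part the rest
theorem pv_filters_of_split (s : List Int) (r : Nat) (hr : r ≤ s.length)
    (hlt : ∀ j : Nat, j < r → s.getD j 0 < 18)
    (hge : ∀ j : Nat, r ≤ j → j < s.length → ¬ s.getD j 0 < 18) :
    s.filter (fun w => decide (w < 18)) = s.take r ∧
    s.filter (fun w => decide (18 ≤ w)) = s.drop r := by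
  have htake : ∀ x ∈ s.take r, x < 18 := by
    intro x hx
    obtain ⟨j, hj, hxj⟩ := List.mem_iff_getElem.mp hx
    have hjr : j < r := by simp [List.length_take] at hj; omega
    have hjs : j < s.length := by omega
    have := hlt j hjr
    rw [List.getD_eq_getElem s 0 hjs] at this
    simpa [← hxj, List.getElem_take] using this
  have hdrop : ∀ x ∈ s.drop r, 18 ≤ x := by
    intro x hx
    obtain ⟨j, hj, hxj⟩ := List.mem_iff_getElem.mp hx
    have hjs : r + j < s.length := by simp [List.length_drop] at hj; omega
    have := hge (r + j) (by omega) hjs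
    rw [List.getD_eq_getElem s 0 hjs] at this
    have h2 : (18 : Int) ≤ s[r + j] := by omega
    simpa [← hxj, List.getElem_drop] using h2
  constructor
  · conv_lhs => rw [← List.take_append_drop r s]
    rw [List.filter_append,
      List.filter_eq_self.mpr (fun a ha => by simpa using htake a ha),
      List.filter_eq_nil_iff.mpr (fun a ha => by simpa using not_lt.mpr (hdrop a ha)),
      List.append_nil]
  · conv_lhs => rw [← List.take_append_drop r s]
    rw [List.filter_append,
      List.filter_eq_nil_iff.mpr (fun a ha => by simpa using not_le.mpr (htake a ha)),
      List.filter_eq_self.mpr (fun a ha => by simpa using hdrop a ha),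
      List.nil_append]

-- ===== VERDICT (by name: the statement is the Claim_ definition above) =====
theorem filtruj_wiek_spec : Claim_equal_filtruj_wiek := by
  intro l _
  unfold Spec_filtruj_wiek filtruj_wiek filtruj_wiek_alt
  set s := PySem.List.sorted l (fun x => x) with hs
  have mono : ∀ j k : Nat, j ≤ k → k < s.length → s.getD k 0 < 18 → s.getD j 0 < 18 := by
    intro j k hjk hk hlt
    have hj : j < s.length := by omega
    rw [List.getD_eq_getElem s 0 hk] at hlt
    rw [List.getD_eq_getElem s 0 hj]
    have := PySem.List.sorted_id_getElem_mono l (p := j) (q := k) hjk (by simpa [hs] using hk)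
    calc s[j] ≤ s[k] := by simpa [hs] using this
      _ < 18 := hlt
  obtain ⟨hr, hlt, hge⟩ :=
    pvBisect18_inv s mono 0 s.length (Nat.zero_le _) le_rfl
      (by omega) (by omega)
  obtain ⟨hfl, hfg⟩ := pv_filters_of_split s (pvBisect18 s 0 s.length) hr hlt hge
  rw [pv_foldl_split]
  simp only [List.nil_append]
  rw [hfl, hfg,
    PySem.List.slice_from s (a := (pvBisect18 s 0 s.length : Int)) (by positivity),
    PySem.List.slice_to s (b := (pvBisect18 s 0 s.length : Int)) (by positivity)]
  simp
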